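-- pv_equiv track=rewrite | github.com/Belzex/assignment_7 | recommendation/recommender.py | match_with_bias
-- ===== SOURCE A (Python) =====
-- def match_with_bias(src_list: list = list(), match_list: list = list(), bias: int = 1, negative_bias: int = 1,
--                     dst_list: list = list()) -> list:
--     """
--     Adds a score value to the destination list given in parameter
--     :param src_list: source list of elements, which will be matched against the matchList
--     :param match_list: match list for determining the bias
--     :param bias: positive bias is applied if an source list element is found in the match list
--     :param negative_bias: negative bias is applied if an source list element is found in the match list
--     :param dst_list: destination list in which the score gets saved
--     :return: the destination list after calculating the score
--     """
--     score: int = 0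
--     for elem in src_list:
--         if elem in match_list:
--             score += bias
--         else:
--             score -= negative_bias
--     dst_list.append(score)
--     return dst_list
-- ===== SOURCE B (Python) =====
-- def match_with_bias(src_list: list = list(), match_list: list = list(), bias: int = 1, negative_bias: int = 1,
--                     dst_list: list = list()) -> list:
--     # Sort both sides and count matches with a single two-pointer merge
--     # (no per-element membership scan), then derive the score in closed form.
--     src = sorted(src_list)
--     ms = sorted(set(match_list))
--     matches = 0
--     j = 0
--     for e in src:
--         while j < len(ms) and ms[j] < e:
--             j += 1
--         if j < len(ms) and ms[j] == e:
--             matches += 1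
--     dst_list.append(matches * bias - (len(src_list) - matches) * negative_bias)
--     return dst_list
-- ===== Notes on version B (the rewrite author's own statement) =====
-- stated objective: faster
-- what changed: Replaces the per-element linear membership scan with sort-both-sides plus a two-pointer merge over sorted src and the sorted distinct match values to count matches, then derives the score by the closed form matches*bias - (len-matches)*negative_bias.
import Mathlib
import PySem

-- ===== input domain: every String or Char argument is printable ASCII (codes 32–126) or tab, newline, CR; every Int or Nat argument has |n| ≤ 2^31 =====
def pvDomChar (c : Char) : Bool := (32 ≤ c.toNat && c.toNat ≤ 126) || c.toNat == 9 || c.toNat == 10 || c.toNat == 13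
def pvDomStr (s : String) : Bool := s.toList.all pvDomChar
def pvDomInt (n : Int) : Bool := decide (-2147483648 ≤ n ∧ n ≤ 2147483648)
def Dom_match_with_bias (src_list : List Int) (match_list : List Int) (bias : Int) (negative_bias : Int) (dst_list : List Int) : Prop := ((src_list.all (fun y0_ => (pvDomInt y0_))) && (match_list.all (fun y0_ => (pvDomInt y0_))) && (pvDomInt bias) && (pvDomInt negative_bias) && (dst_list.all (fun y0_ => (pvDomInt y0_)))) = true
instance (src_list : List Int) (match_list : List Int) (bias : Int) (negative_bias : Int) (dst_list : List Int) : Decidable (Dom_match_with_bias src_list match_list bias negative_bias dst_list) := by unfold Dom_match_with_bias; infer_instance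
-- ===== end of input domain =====

-- B counts nMatch by a two-pointer merge over sorted src and sorted distinct match values, then a closed-form score;
-- Python A (and B) mutate dst_list in place — the equivalence proved here is about the return value.

-- ===== PORT A =====
def match_with_bias (src_list : List Int) (match_list : List Int) (bias : Int) (negative_bias : Int) (dst_list : List Int) : List Int :=
  let score : Int :=
    src_list.foldl (fun score elem =>
      if elem ∈ match_list then score + bias else score - negative_bias) 0
  dst_list ++ [score]

-- ===== PORT B =====
-- the loop state (nMatch, remaining suffix of ms): the persistent index j into ms is
-- represented by the suffix ms[j:], and the 'while ms[j] < e: j += 1' by dropWhile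
def pvMergeStep (st : Int × List Int) (e : Int) : Int × List Int :=
  let ms' := st.2.dropWhile (fun m => decide (m < e))
  (if ms'.head? = some e then st.1 + 1 else st.1, ms')

def match_with_bias_alt (src_list : List Int) (match_list : List Int) (bias : Int) (negative_bias : Int) (dst_list : List Int) : List Int :=
  let src := PySem.List.sorted src_list (fun x => x) false
  let ms := PySem.List.sorted (PySem.Set.ofList match_list) (fun x => x) false
  let nMatch : Int := (src.foldl pvMergeStep (0, ms)).1
  dst_list ++ [nMatch * bias - ((src_list.length : Int) - nMatch) * negative_bias]

-- ===== PRECONDITION & SPEC =====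
def Spec_match_with_bias (src_list : List Int) (match_list : List Int) (bias : Int) (negative_bias : Int) (dst_list : List Int) (out : List Int) : Prop := out = match_with_bias_alt src_list match_list bias negative_bias dst_list
instance (src_list : List Int) (match_list : List Int) (bias : Int) (negative_bias : Int) (dst_list : List Int) (out : List Int) : Decidable (Spec_match_with_bias src_list match_list bias negative_bias dst_list out) := by unfold Spec_match_with_bias; infer_instance

-- ===== CLAIM (what is proved, stated in full; the proofs are below) =====
def Claim_equal_match_with_bias : Prop := ∀ (src_list : List Int) (match_list : List Int) (bias : Int) (negative_bias : Int) (dst_list : List Int), Dom_match_with_bias src_list match_list bias negative_bias dst_list → Spec_match_with_bias src_list match_list bias negative_bias dst_list (match_with_bias src_list match_list bias negative_bias dst_list)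

-- ===== LEMMAS AND PROOFS =====

-- elements dropped by `dropWhile (· < e)` are all < e, so membership of any y ≥ e is unchanged
lemma mem_dropWhile_lt_iff {e y : Int} (hey : e ≤ y) (ms : List Int) :
    y ∈ ms.dropWhile (fun m => decide (m < e)) ↔ y ∈ ms := by
  constructor
  · intro h; exact (ms.dropWhile_sublist _).mem h
  · intro h
    rw [← List.takeWhile_append_dropWhile (p := fun m => decide (m < e)) (l := ms),
        List.mem_append] at h
    rcases h with h | h
    · have := List.mem_takeWhile_imp h
      simp at this; omega
    · exact h

-- head of the remaining suffix equals e iff e is present, for strictly sorted ms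
lemma head_dropWhile_eq_iff {e : Int} (ms : List Int) (hms : ms.Pairwise (· < ·)) :
    (ms.dropWhile (fun m => decide (m < e))).head? = some e ↔ e ∈ ms := by
  constructor
  · intro h
    have : e ∈ ms.dropWhile (fun m => decide (m < e)) := by
      cases hd : ms.dropWhile (fun m => decide (m < e)) with
      | nil => simp [hd] at h
      | cons a t => simp [hd] at h; simp [h]
    exact (ms.dropWhile_sublist _).mem this
  · intro h
    have hmem : e ∈ ms.dropWhile (fun m => decide (m < e)) :=
      (mem_dropWhile_lt_iff (le_refl e) ms).mpr h
    cases hd : ms.dropWhile (fun m => decide (m < e)) with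
    | nil => simp [hd] at hmem
    | cons a t =>
      rw [hd] at hmem
      have ha : ¬ (a < e) := by
        have := List.head?_dropWhile_not (p := fun m => decide (m < e)) ms
        rw [hd] at this; simpa using this
      have hpw : (a :: t).Pairwise (· < ·) := hd ▸ hms.sublist (ms.dropWhile_sublist _)
      rcases List.mem_cons.mp hmem with rfl | hmt
      · simp
      · have : a < e := (List.pairwise_cons.mp hpw).1 e hmt
        omega

-- the merge fold counts, for sorted src and strictly sorted ms, the src elements present in ms
lemma mergeCount_eq_countP :
    ∀ (src : List Int) (ms : List Int) (acc : Int),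
      src.Pairwise (· ≤ ·) → ms.Pairwise (· < ·) →
      (src.foldl pvMergeStep (acc, ms)).1 = acc + (src.countP (fun e => decide (e ∈ ms)) : Int) := by
  intro src
  induction src with
  | nil => intro ms acc _ _; simp
  | cons e rest ih =>
    intro ms acc hsrc hms
    have hrest : rest.Pairwise (· ≤ ·) := (List.pairwise_cons.mp hsrc).2
    have hle : ∀ y ∈ rest, e ≤ y := (List.pairwise_cons.mp hsrc).1
    have hms' : (ms.dropWhile (fun m => decide (m < e))).Pairwise (· < ·) :=
      hms.sublist (ms.dropWhile_sublist _)
    simp only [List.foldl_cons, List.countP_cons]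
    rw [show (List.foldl pvMergeStep (pvMergeStep (acc, ms) e) rest) =
          (List.foldl pvMergeStep ((if (ms.dropWhile (fun m => decide (m < e))).head? = some e
              then acc + 1 else acc), ms.dropWhile (fun m => decide (m < e))) rest) from rfl]
    rw [ih _ _ hrest hms']
    have hcnt : rest.countP (fun y => decide (y ∈ ms.dropWhile (fun m => decide (m < e))))
        = rest.countP (fun y => decide (y ∈ ms)) := by
      apply List.countP_congr
      intro y hy
      simp [mem_dropWhile_lt_iff (hle y hy) ms]
    rw [hcnt]
    by_cases he : e ∈ ms
    · rw [if_pos ((head_dropWhile_eq_iff ms hms).mpr he)]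
      simp [he]; ring
    · rw [if_neg (fun h => he ((head_dropWhile_eq_iff ms hms).mp h))]
      simp [he]

-- A's accumulating fold in closed form
lemma score_closed (match_list : List Int) (bias negative_bias : Int) :
    ∀ (src_list : List Int) (s : Int),
      src_list.foldl (fun score elem =>
        if elem ∈ match_list then score + bias else score - negative_bias) s
      = s + (src_list.countP (fun e => decide (e ∈ match_list)) : Int) * bias
          - ((src_list.length : Int) - (src_list.countP (fun e => decide (e ∈ match_list)) : Int)) * negative_bias := by
  intro src_list
  induction src_list with
  | nil => intro s; simp
  | cons x xs ih =>
    intro s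
    simp only [List.foldl_cons, List.countP_cons, List.length_cons]
    by_cases h : x ∈ match_list
    · rw [if_pos h, ih]; simp [h]; ring
    · rw [if_neg h, ih]; simp [h]; ring

-- ===== VERDICT (by name: the statement is the Claim_ definition above) =====
theorem match_with_bias_spec : Claim_equal_match_with_bias := by
  intro src_list match_list bias negative_bias dst_list _
  unfold Spec_match_with_bias
  simp only [match_with_bias, match_with_bias_alt]
  have hsrc : (PySem.List.sorted src_list (fun x => x) false).Pairwise (· ≤ ·) :=
    PySem.List.sorted_pairwise src_list (fun x => x)
  have hms : (PySem.List.sorted (PySem.Set.ofList match_list) (fun x => x) false).Pairwise (· < ·) :=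
    PySem.List.sorted_ofList_pairwise_lt match_list
  rw [score_closed match_list bias negative_bias src_list 0, zero_add,
      mergeCount_eq_countP _ _ 0 hsrc hms, zero_add]
  have hmem : ∀ e : Int, (e ∈ PySem.List.sorted (PySem.Set.ofList match_list) (fun x => x) false) ↔ e ∈ match_list := by
    intro e
    rw [PySem.List.mem_sorted, PySem.Set.mem_ofList]
  have hcount : (PySem.List.sorted src_list (fun x => x) false).countP
      (fun e => decide (e ∈ PySem.List.sorted (PySem.Set.ofList match_list) (fun x => x) false))
      = src_list.countP (fun e => decide (e ∈ match_list)) := by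
    rw [(PySem.List.sorted_perm src_list (fun x => x) false).countP_eq]
    apply List.countP_congr
    intro y _; simp [hmem y]
  rw [hcount]
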